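-- pv_equiv track=rewrite | github.com/parthkalgaonkar/bootcamp_assignments | sequential/usb_decode/test_nrzi.py | gen_input
-- ===== SOURCE A (Python) =====
-- def bit_stuff(data: str) -> str:
--     retval = []
--     count = 0
--     for bit in data:
--         if bit == "0":
--             count = 0
--         elif bit == "1":
--             if count == 6:
--                 retval.append("0")
--                 count = 0
--             count += 1
--         retval.append(bit)
--     return "".join(retval)
--
-- def gen_input(data: str):
--     current = 1
--     nrzi = []
--     for bit in bit_stuff(data):
--         if bit == "0":
--             current = 1-current
--         nrzi.append(current)
--     return nrzi
-- ===== SOURCE B (Python) =====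
-- def gen_input(data: str):
--     current = 1
--     out = []
--     count = 0
--     for bit in data:
--         if bit == "1" and count == 6:
--             current = 1 - current
--             out.append(current)
--             count = 0
--         if bit == "0":
--             current = 1 - current
--             count = 0
--         elif bit == "1":
--             count += 1
--         out.append(current)
--     return out
-- ===== Notes on version B (the rewrite author's own statement) =====
-- stated objective: alternative
-- what changed: B fuses A's two passes (bit_stuff building an intermediate string, then the NRZI loop) into one loop over data that maintains the run-of-ones counter and the current level together, never materialising the stuffed string.
import Mathlib
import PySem

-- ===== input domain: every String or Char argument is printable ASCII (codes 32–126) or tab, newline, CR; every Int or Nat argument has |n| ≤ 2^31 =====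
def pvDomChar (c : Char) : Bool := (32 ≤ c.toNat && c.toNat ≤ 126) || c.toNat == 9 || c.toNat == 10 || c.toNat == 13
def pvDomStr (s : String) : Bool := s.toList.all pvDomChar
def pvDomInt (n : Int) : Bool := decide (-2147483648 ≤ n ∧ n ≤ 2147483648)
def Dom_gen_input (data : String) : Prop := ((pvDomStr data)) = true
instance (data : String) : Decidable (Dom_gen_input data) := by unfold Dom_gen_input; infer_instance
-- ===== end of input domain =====

-- B fuses A's two passes (bit-stuffing into an intermediate string, then NRZI encoding) into one loop.

-- ===== PORT A =====
-- the loop of bit_stuff: recursion over the characters with the consecutive-ones count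
def stuffRec : List Char → Int → List Char
  | [], _ => []
  | b :: rest, count =>
    if b = '0' then b :: stuffRec rest 0
    else if b = '1' then
      if count = 6 then '0' :: b :: stuffRec rest 1
      else b :: stuffRec rest (count + 1)
    else b :: stuffRec rest count

def bit_stuff (data : String) : String := String.ofList (stuffRec data.toList 0)

-- the loop of gen_input: recursion over the stuffed characters with the current level
def nrziRec : List Char → Int → List Int
  | [], _ => []
  | b :: rest, current =>
    if b = '0' then (1 - current) :: nrziRec rest (1 - current)
    else current :: nrziRec rest current

def gen_input (data : String) : List Int := nrziRec (bit_stuff data).toList 1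

-- ===== PORT B =====
-- B's single loop: state = (current level, consecutive-ones count)
def altRec : List Char → Int → Int → List Int
  | [], _, _ => []
  | b :: rest, current, count =>
    if b = '1' ∧ count = 6 then
      (1 - current) :: (1 - current) :: altRec rest (1 - current) 1
    else if b = '0' then (1 - current) :: altRec rest (1 - current) 0
    else if b = '1' then current :: altRec rest current (count + 1)
    else current :: altRec rest current count

def gen_input_alt (data : String) : List Int := altRec data.toList 1 0

-- ===== PRECONDITION & SPEC =====
def Spec_gen_input (data : String) (out : List Int) : Prop := out = gen_input_alt data
instance (data : String) (out : List Int) : Decidable (Spec_gen_input data out) := by unfold Spec_gen_input; infer_instance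

-- ===== CLAIM (what is proved, stated in full; the proofs are below) =====
def Claim_equal_gen_input : Prop := ∀ (data : String), Dom_gen_input data → Spec_gen_input data (gen_input data)

-- ===== LEMMAS AND PROOFS =====
theorem nrzi_stuff_eq_alt : ∀ (l : List Char) (curr cnt : Int),
    nrziRec (stuffRec l cnt) curr = altRec l curr cnt := by
  intro l
  induction l with
  | nil => intro curr cnt; simp [stuffRec, nrziRec, altRec]
  | cons b rest ih =>
    intro curr cnt
    by_cases h0 : b = '0' <;> by_cases h1 : b = '1' <;> by_cases h6 : cnt = 6 <;>
      simp [stuffRec, nrziRec, altRec, h0, h1, h6, ih]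

-- ===== VERDICT (by name: the statement is the Claim_ definition above) =====
theorem gen_input_spec : Claim_equal_gen_input := by
  intro data _
  unfold Spec_gen_input gen_input gen_input_alt bit_stuff
  rw [String.toList_ofList]
  exact nrzi_stuff_eq_alt data.toList 1 0
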